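-- pv_equiv track=rewrite | github.com/jagiyahh/language-processing | maxmatch.py | MaxMatch
-- ===== SOURCE A (Python) =====
-- def MaxMatch(line, dictionary):
--     if not line:
--         return ""
--
--     for a in range(len(line), 0, -1):
--         first = line[:a]
--         rest = line[a:]
--         if first in dictionary:
--             return first + ' ' + MaxMatch(rest, dictionary)
--
--     # failed to find a word
--     first = line[0]
--     rest = line[1:]
--     return first + ' ' + MaxMatch(rest, dictionary)
-- ===== SOURCE B (Python) =====
-- def MaxMatch(line, dictionary):
--     words = set(dictionary)
--     maxlen = max(map(len, words), default=0)
--     n = len(line)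
--     res = []
--     i = 0
--     while i < n:
--         # scan candidate lengths UPWARD, remembering the longest match (default 1)
--         best = 1
--         for a in range(1, min(n - i, maxlen) + 1):
--             if line[i:i + a] in words:
--                 best = a
--         res.append(line[i:i + best])
--         res.append(' ')
--         i += best
--     return ''.join(res)
-- ===== Notes on version B (the rewrite author's own statement) =====
-- stated objective: faster
-- what changed: Replaces A's deep recursion with full-length descending prefix scans and list membership by an iterative loop that scans candidate lengths upward, capped at the dictionary's longest word, keeping the longest hash-set match in an accumulator.
import Mathlib
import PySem

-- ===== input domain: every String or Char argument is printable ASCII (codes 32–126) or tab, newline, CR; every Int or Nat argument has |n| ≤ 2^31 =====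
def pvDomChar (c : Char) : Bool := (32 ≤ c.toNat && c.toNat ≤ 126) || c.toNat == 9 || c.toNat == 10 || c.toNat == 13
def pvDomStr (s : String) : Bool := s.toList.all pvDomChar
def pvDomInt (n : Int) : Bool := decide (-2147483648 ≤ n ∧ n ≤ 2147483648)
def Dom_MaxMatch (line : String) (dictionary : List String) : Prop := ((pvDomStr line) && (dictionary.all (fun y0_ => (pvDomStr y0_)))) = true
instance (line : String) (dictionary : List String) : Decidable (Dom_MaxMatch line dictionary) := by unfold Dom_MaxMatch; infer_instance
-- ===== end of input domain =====

-- B replaces A's deep recursion and descending full-length prefix scans by an iterative loop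
-- scanning candidate lengths upward, capped at the dictionary's longest word, keeping the
-- longest hash-set match in an accumulator (objective: faster).  Same return value proved.

-- ===== PORT A =====
-- 'for a in range(len(line), 0, -1): if line[:a] in dictionary: return …':
-- first (largest) a in a, a-1, …, 1 whose prefix is in the dictionary.
def findTokA (l : List Char) (dict : List String) : Nat → Option Nat
  | 0 => none
  | a + 1 => if dict.contains (String.ofList (l.take (a + 1))) then some (a + 1)
             else findTokA l dict a

theorem findTokA_pos (l : List Char) (dict : List String) (a b : Nat)
    (h : findTokA l dict a = some b) : 1 ≤ b := by
  induction a with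
  | zero => simp [findTokA] at h
  | succ a ih =>
    unfold findTokA at h
    split at h
    · injection h with h2; omega
    · exact ih h

theorem findTokA_getD_pos (l : List Char) (dict : List String) (a : Nat) :
    1 ≤ (findTokA l dict a).getD 1 := by
  cases h : findTokA l dict a with
  | none => simp
  | some b => simpa using findTokA_pos l dict a b h

-- A's body on the character list; the failed-search fallback (first = line[0], rest = line[1:])
-- is exactly the a = 1 case, hence the .getD 1.
def MaxMatchCore (l : List Char) (dict : List String) : List Char :=
  if _hl : l = [] then []
  else
    let a := (findTokA l dict l.length).getD 1
    l.take a ++ ' ' :: MaxMatchCore (l.drop a) dict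
termination_by l.length
decreasing_by
  have h1 := findTokA_getD_pos l dict l.length
  have h2 : l.length ≠ 0 := by simpa using _hl
  simp only [List.length_drop]; omega

def MaxMatch (line : String) (dictionary : List String) : String :=
  String.ofList (MaxMatchCore line.toList dictionary)

-- ===== PORT B =====
-- Source B's inner 'for a in range(1, min(n-i, maxlen)+1): if line[i:i+a] in words: best = a'
-- as a left fold over the ascending range of candidate lengths, starting from best = 1.
def bestPrefix (l : List Char) (ws : PySem.Set String) (limit : Nat) : Nat :=
  (List.range' 1 limit).foldl
    (fun best a => if ws.contains (String.ofList (l.take a)) then a else best) 1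

theorem bestPrefix_pos (l : List Char) (ws : PySem.Set String) (limit : Nat) :
    1 ≤ bestPrefix l ws limit := by
  unfold bestPrefix
  have : ∀ (xs : List Nat) (b : Nat), 1 ≤ b → (∀ a ∈ xs, 1 ≤ a) →
      1 ≤ xs.foldl (fun best a => if ws.contains (String.ofList (l.take a)) then a else best) b := by
    intro xs
    induction xs with
    | nil => intro b hb _; simpa using hb
    | cons a xs ih =>
      intro b hb hx
      simp only [List.foldl_cons]
      apply ih
      · split
        · exact hx a (List.mem_cons_self)
        · exact hb
      · intro c hc; exact hx c (List.mem_cons_of_mem _ hc)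
  apply this _ 1 le_rfl
  intro a ha
  have := List.mem_range'_1.mp ha
  omega

-- Source B's outer while loop: the remaining suffix l is line[i:]; res gets the token and a space.
def MaxMatchAltCore (l : List Char) (ws : PySem.Set String) (maxlen : Nat) : List Char :=
  if _hl : l = [] then []
  else
    let b := bestPrefix l ws (min l.length maxlen)
    (l.take b ++ [' ']) ++ MaxMatchAltCore (l.drop b) ws maxlen
termination_by l.length
decreasing_by
  have h1 := bestPrefix_pos l ws (min l.length maxlen)
  have h2 : l.length ≠ 0 := by simpa using _hl
  simp only [List.length_drop]; omega

-- words = set(dictionary); maxlen = max(map(len, words), default=0) (lengths ≥ 0, so a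
-- Nat fold with max from 0 is exact; max over a set is iteration-order independent).
def MaxMatch_alt (line : String) (dictionary : List String) : String :=
  let ws : PySem.Set String := PySem.Set.ofList dictionary
  let maxlen := (ws.map (fun w => w.toList.length)).foldl Nat.max 0
  String.ofList (MaxMatchAltCore line.toList ws maxlen)

-- ===== PRECONDITION & SPEC =====
def Spec_MaxMatch (line : String) (dictionary : List String) (out : String) : Prop := out = MaxMatch_alt line dictionary
instance (line : String) (dictionary : List String) (out : String) : Decidable (Spec_MaxMatch line dictionary out) := by unfold Spec_MaxMatch; infer_instance

-- ===== CLAIM (what is proved, stated in full; the proofs are below) =====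
def Claim_equal_MaxMatch : Prop := ∀ (line : String) (dictionary : List String), Dom_MaxMatch line dictionary → Spec_MaxMatch line dictionary (MaxMatch line dictionary)

-- ===== LEMMAS AND PROOFS =====

theorem init_le_foldl_max (xs : List Nat) (init : Nat) : init ≤ xs.foldl Nat.max init := by
  induction xs generalizing init with
  | nil => simp
  | cons a xs ih => exact le_trans (Nat.le_max_left init a) (ih (Nat.max init a))

theorem le_foldl_max (xs : List Nat) : ∀ (init x : Nat), x ∈ xs → x ≤ xs.foldl Nat.max init := by
  induction xs with
  | nil => intro _ _ hx; simp at hx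
  | cons a xs ih =>
    intro init x hx
    rcases List.mem_cons.mp hx with h | h
    · subst h
      exact le_trans (Nat.le_max_right init x) (init_le_foldl_max xs (Nat.max init x))
    · exact ih (Nat.max init a) x h

theorem contains_ofList_eq (dict : List String) (s : String) :
    (PySem.Set.ofList dict).contains s = dict.contains s := by
  by_cases h : s ∈ dict
  · have h' : s ∈ PySem.Set.ofList dict := (PySem.Set.mem_ofList _ _).mpr h
    simp_all
  · have h' : s ∉ PySem.Set.ofList dict := fun hc => h ((PySem.Set.mem_ofList _ _).mp hc)
    simp_all

-- descending first-match from limit = ascending last-match up to limit (with default 1)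
theorem bestPrefix_eq_findTokA (l : List Char) (dict : List String) :
    ∀ limit, bestPrefix l (PySem.Set.ofList dict) limit = (findTokA l dict limit).getD 1 := by
  intro limit
  induction limit with
  | zero => simp [bestPrefix, findTokA]
  | succ n ih =>
    unfold bestPrefix at ih ⊢
    rw [List.range'_1_concat, List.foldl_append]
    simp only [List.foldl_cons, List.foldl_nil, Nat.add_comm 1 n]
    rw [ih, contains_ofList_eq,
        show findTokA l dict (n + 1)
           = if dict.contains (String.ofList (l.take (n + 1))) then some (n + 1)
             else findTokA l dict n from rfl]
    split <;> simp

-- prefixes longer than every dictionary word never match, so A's scan from the full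
-- remaining length agrees with a scan capped at maxlen
theorem findTokA_cap (l : List Char) (dict : List String) (maxlen : Nat)
    (hb : ∀ s ∈ dict, s.toList.length ≤ maxlen) :
    ∀ a, a ≤ l.length → findTokA l dict a = findTokA l dict (min a maxlen) := by
  intro a
  induction a with
  | zero => intro _; simp
  | succ a ih =>
    intro ha
    by_cases hm : a + 1 ≤ maxlen
    · rw [Nat.min_eq_left hm]
    · have hlen : (String.ofList (l.take (a + 1))).toList.length = a + 1 := by
        simp [List.length_take]; omega
      have hnot : (String.ofList (l.take (a + 1))) ∉ dict := by
        intro hc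
        have := hb _ hc
        omega
      have hcont : dict.contains (String.ofList (l.take (a + 1))) = false := by
        simpa using hnot
      rw [Nat.min_eq_right (by omega),
          show findTokA l dict (a + 1)
             = if dict.contains (String.ofList (l.take (a + 1))) then some (a + 1)
               else findTokA l dict a from rfl, hcont]
      simp only [Bool.false_eq_true, if_false]
      rw [ih (by omega), Nat.min_eq_right (by omega)]

theorem core_eq (dict : List String) (maxlen : Nat)
    (hb : ∀ s ∈ dict, s.toList.length ≤ maxlen) :
    ∀ (n : Nat) (l : List Char), l.length ≤ n →
      MaxMatchCore l dict = MaxMatchAltCore l (PySem.Set.ofList dict) maxlen := by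
  intro n
  induction n with
  | zero =>
    intro l hl
    have : l = [] := List.eq_nil_of_length_eq_zero (by omega)
    subst this
    rw [MaxMatchCore, MaxMatchAltCore]
    simp
  | succ n ih =>
    intro l hl
    by_cases hl0 : l = []
    · subst hl0
      rw [MaxMatchCore, MaxMatchAltCore]
      simp
    · rw [MaxMatchCore, MaxMatchAltCore]
      simp only [hl0, dif_neg, not_false_iff]
      rw [findTokA_cap l dict maxlen hb l.length (le_refl _),
          ← bestPrefix_eq_findTokA l dict (min l.length maxlen)]
      set b := bestPrefix l (PySem.Set.ofList dict) (min l.length maxlen) with hbdef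
      have hpos : 1 ≤ b := bestPrefix_pos l _ _
      have hlen : l.length ≠ 0 := by simpa using hl0
      rw [ih (l.drop b) (by simp [List.length_drop]; omega)]
      simp

theorem maxlen_bound (dict : List String) (s : String) (hs : s ∈ dict) :
    s.toList.length ≤ ((PySem.Set.ofList dict).map (fun w => w.toList.length)).foldl Nat.max 0 := by
  apply le_foldl_max
  exact List.mem_map_of_mem ((PySem.Set.mem_ofList _ _).mpr hs)

-- ===== VERDICT (by name: the statement is the Claim_ definition above) =====
theorem MaxMatch_spec : Claim_equal_MaxMatch := by
  intro line dictionary _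
  unfold Spec_MaxMatch MaxMatch MaxMatch_alt
  congr 1
  exact core_eq dictionary _ (fun s hs => maxlen_bound dictionary s hs)
    line.toList.length line.toList (le_refl _)
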